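-- pv_equiv track=rewrite | github.com/imn00133/algorithm | ItIsCodingTest/chap07/03.make_tteokbokki.py | binary_exploration
-- ===== SOURCE A (Python) =====
-- def calc_guest_rice_cake_length(arr, cutting):
--     total = 0
--     for rice_cake in arr:
--         if rice_cake <= cutting:
--             continue
--         total += rice_cake - cutting
--     return total
--
-- def binary_exploration(arr, ask_length):
--     left = 0
--     right = 10 ** 9
--     while left < right:
--         mid = (left + right) // 2 + 1
--
--         if calc_guest_rice_cake_length(arr, mid) < ask_length:
--             right = mid - 1
--             continue
--         left = mid
--     return left
-- ===== SOURCE B (Python) =====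
-- def binary_exploration(arr, ask_length):
--     # sort positives descending; the answer is the max over k of floor((P[k]-ask)/k)
--     if ask_length <= 0:
--         return 10 ** 9
--     xs = sorted((x for x in arr if x > 0), reverse=True)
--     best = 0
--     prefix = 0
--     for k, x in enumerate(xs, start=1):
--         prefix += x
--         best = max(best, (prefix - ask_length) // k)
--     return min(best, 10 ** 9)
-- ===== Notes on version B (the rewrite author's own statement) =====
-- stated objective: faster
-- what changed: Replaces the ~30-iteration integer bisection (each iteration rescanning arr) by one sort of the positive elements plus a single prefix-sum pass taking the max of the closed-form candidates floor((P[k]-ask)/k), clamped to [0,10^9].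
import Mathlib
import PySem

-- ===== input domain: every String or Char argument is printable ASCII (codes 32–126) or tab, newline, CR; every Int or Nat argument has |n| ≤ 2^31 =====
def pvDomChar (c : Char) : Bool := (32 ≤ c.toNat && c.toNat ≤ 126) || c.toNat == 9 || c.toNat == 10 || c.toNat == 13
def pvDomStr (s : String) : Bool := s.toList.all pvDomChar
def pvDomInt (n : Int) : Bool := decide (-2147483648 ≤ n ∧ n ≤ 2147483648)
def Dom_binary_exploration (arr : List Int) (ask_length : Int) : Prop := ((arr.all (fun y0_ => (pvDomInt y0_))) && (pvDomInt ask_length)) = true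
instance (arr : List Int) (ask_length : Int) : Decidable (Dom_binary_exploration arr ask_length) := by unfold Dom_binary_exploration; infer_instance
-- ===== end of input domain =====

-- B replaces A's 30-iteration integer bisection (each step rescanning arr) by one descending
-- sort of the positive elements plus a single prefix-sum pass taking the max of the
-- closed-form candidates floor((P_k - ask)/k), clamped to [0, 10^9]  (objective: faster).

-- ===== PORT A =====
def calc_guest_rice_cake_length (arr : List Int) (cutting : Int) : Int :=
  arr.foldl (fun total rice_cake =>
    if rice_cake ≤ cutting then total else total + (rice_cake - cutting)) 0

-- midpoint bounds used by the loop's termination argument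
lemma pvMidBounds (l r : Int) (h : l < r) :
    l < PySem.Int.floordiv (l + r) 2 + 1 ∧ PySem.Int.floordiv (l + r) 2 + 1 ≤ r := by
  rw [PySem.Int.floordiv_eq_ediv_of_pos (by norm_num)]
  omega

-- A's while-loop, recursion on right-left
def binEx_go (arr : List Int) (ask_length : Int) (left right : Int) : Int :=
  if h : left < right then
    let mid := PySem.Int.floordiv (left + right) 2 + 1
    if calc_guest_rice_cake_length arr mid < ask_length then
      binEx_go arr ask_length left (mid - 1)
    else
      binEx_go arr ask_length mid right
  else left
termination_by (right - left).toNat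
decreasing_by
  · have := pvMidBounds left right h; omega
  · have := pvMidBounds left right h; omega

def binary_exploration (arr : List Int) (ask_length : Int) : Int :=
  binEx_go arr ask_length 0 (10 ^ 9)

-- ===== PORT B =====
-- one enumerate step of Source B's loop: state (k, prefix, best)
def bstep (ask_length : Int) (s : Int × Int × Int) (x : Int) : Int × Int × Int :=
  let k := s.1 + 1
  let pre := s.2.1 + x
  (k, pre, max s.2.2 (PySem.Int.floordiv (pre - ask_length) k))

def binary_exploration_alt (arr : List Int) (ask_length : Int) : Int :=
  if ask_length ≤ 0 then 10 ^ 9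
  else
    let xs := PySem.List.sorted (arr.filter (fun x => decide (0 < x))) (fun x => x) true
    let st := xs.foldl (bstep ask_length) (0, 0, 0)
    min st.2.2 (10 ^ 9)

-- ===== PRECONDITION & SPEC =====
def Spec_binary_exploration (arr : List Int) (ask_length : Int) (out : Int) : Prop := out = binary_exploration_alt arr ask_length
instance (arr : List Int) (ask_length : Int) (out : Int) : Decidable (Spec_binary_exploration arr ask_length out) := by unfold Spec_binary_exploration; infer_instance

-- ===== CLAIM (what is proved, stated in full; the proofs are below) =====
def Claim_equal_binary_exploration : Prop := ∀ (arr : List Int) (ask_length : Int), Dom_binary_exploration arr ask_length → Spec_binary_exploration arr ask_length (binary_exploration arr ask_length)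

-- ===== LEMMAS AND PROOFS =====

-- the amount of rice cake the guests get at cut height c
def fsum (arr : List Int) (c : Int) : Int := (arr.map (fun x => max (x - c) 0)).sum

lemma calc_eq_fsum (arr : List Int) (c : Int) :
    calc_guest_rice_cake_length arr c = fsum arr c := by
  have h : ∀ (l : List Int) (t : Int),
      l.foldl (fun total rice_cake =>
        if rice_cake ≤ c then total else total + (rice_cake - c)) t = t + fsum l c := by
    intro l
    induction l with
    | nil => intro t; simp [fsum]
    | cons x xs ih =>
      intro t
      simp only [List.foldl_cons, fsum, List.map_cons, List.sum_cons]
      rw [ih]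
      by_cases hx : x ≤ c
      · simp [hx, show max (x - c) 0 = 0 by omega, fsum]
      · simp only [hx, if_neg]
        rw [show max (x - c) 0 = x - c by omega]
        simp [fsum]; ring
  simpa using h arr 0

lemma fsum_nonneg (arr : List Int) (c : Int) : 0 ≤ fsum arr c := by
  induction arr with
  | nil => simp [fsum]
  | cons x xs ih =>
    simp only [fsum, List.map_cons, List.sum_cons] at *
    have : (0:Int) ≤ max (x - c) 0 := le_max_right _ _
    omega

lemma fsum_antitone (arr : List Int) {c d : Int} (h : c ≤ d) : fsum arr d ≤ fsum arr c := by
  induction arr with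
  | nil => simp [fsum]
  | cons x xs ih =>
    simp only [fsum, List.map_cons, List.sum_cons] at *
    have : max (x - d) 0 ≤ max (x - c) 0 := by omega
    omega

-- characterisation both programs satisfy: r is the largest feasible cut in [0,10^9] (or 0)
def Good (arr : List Int) (ask r : Int) : Prop :=
  0 ≤ r ∧ r ≤ 10 ^ 9 ∧ (r = 0 ∨ ask ≤ fsum arr r) ∧
  ∀ c, r < c → c ≤ 10 ^ 9 → fsum arr c < ask

lemma good_unique {arr : List Int} {ask r1 r2 : Int}
    (h1 : Good arr ask r1) (h2 : Good arr ask r2) : r1 = r2 := by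
  obtain ⟨n1, b1, f1, u1⟩ := h1
  obtain ⟨n2, b2, f2, u2⟩ := h2
  by_contra hne
  rcases lt_or_gt_of_ne hne with hlt | hgt
  · have hfeas : ask ≤ fsum arr r2 := f2.resolve_left (by omega)
    have := u1 r2 hlt b2
    omega
  · have hfeas : ask ≤ fsum arr r1 := f1.resolve_left (by omega)
    have := u2 r1 hgt b1
    omega

lemma go_good (arr : List Int) (ask : Int) :
    ∀ n l r, (r - l).toNat ≤ n → 0 ≤ l → l ≤ r → r ≤ 10 ^ 9 →
      (l = 0 ∨ ask ≤ fsum arr l) →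
      (∀ c, r < c → c ≤ 10 ^ 9 → fsum arr c < ask) →
      Good arr ask (binEx_go arr ask l r) := by
  intro n
  induction n with
  | zero =>
    intro l r hn h0 hlr hr hf hu
    have hl : ¬ l < r := by omega
    rw [binEx_go, dif_neg hl]
    exact ⟨h0, by omega, hf, fun c hc h9 => hu c (by omega) h9⟩
  | succ n ih =>
    intro l r hn h0 hlr hr hf hu
    by_cases h : l < r
    · rw [binEx_go, dif_pos h]
      obtain ⟨hm1, hm2⟩ := pvMidBounds l r h
      simp only [calc_eq_fsum]
      by_cases hc : fsum arr (PySem.Int.floordiv (l + r) 2 + 1) < ask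
      · rw [if_pos hc]
        refine ih l (PySem.Int.floordiv (l + r) 2 + 1 - 1) (by omega) h0 (by omega) (by omega) hf ?_
        intro c hc1 hc2
        exact lt_of_le_of_lt (fsum_antitone arr (show PySem.Int.floordiv (l + r) 2 + 1 ≤ c by omega)) hc
      · rw [if_neg hc]
        exact ih (PySem.Int.floordiv (l + r) 2 + 1) r (by omega) (by omega) (by omega) hr
          (Or.inr (not_lt.mp hc)) hu
    · rw [binEx_go, dif_neg h]
      exact ⟨h0, by omega, hf, fun c hc h9 => hu c (by omega) h9⟩

lemma a_good (arr : List Int) (ask : Int) : Good arr ask (binary_exploration arr ask) := by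
  unfold binary_exploration
  refine go_good arr ask 1000000000 0 (10 ^ 9) (by norm_num) (by norm_num) (by norm_num)
    (by norm_num) (Or.inl rfl) ?_
  intro c h1 h2
  omega

lemma fsum_perm {xs ys : List Int} (h : xs.Perm ys) (c : Int) : fsum xs c = fsum ys c :=
  (h.map _).sum_eq

lemma fsum_filter_pos (arr : List Int) {c : Int} (hc : 0 ≤ c) :
    fsum (arr.filter fun x => decide (0 < x)) c = fsum arr c := by
  induction arr with
  | nil => rfl
  | cons x t ih =>
    by_cases hx : 0 < x
    · rw [List.filter_cons, if_pos (by simpa using hx)]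
      simp only [fsum, List.map_cons, List.sum_cons]
      simp only [fsum] at ih
      omega
    · rw [List.filter_cons, if_neg (by simpa using hx)]
      rw [ih]
      simp only [fsum, List.map_cons, List.sum_cons]
      have hm : max (x - c) 0 = 0 := by omega
      omega

lemma fsum_append (a b : List Int) (c : Int) : fsum (a ++ b) c = fsum a c + fsum b c := by
  simp [fsum]

lemma fsum_all_le {ys : List Int} {c : Int} (h : ∀ x ∈ ys, x ≤ c) : fsum ys c = 0 := by
  induction ys with
  | nil => rfl
  | cons x t ih =>
    have hx : max (x - c) 0 = 0 := by have := h x (by simp); omega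
    simp only [fsum, List.map_cons, List.sum_cons] at *
    rw [hx, ih (fun y hy => h y (by simp [hy]))]
    omega

lemma fsum_all_gt {ys : List Int} {c : Int} (h : ∀ x ∈ ys, c < x) :
    fsum ys c = ys.sum - ys.length * c := by
  induction ys with
  | nil => simp [fsum]
  | cons x t ih =>
    have hx : max (x - c) 0 = x - c := by have := h x (by simp); omega
    simp only [fsum, List.map_cons, List.sum_cons, List.length_cons] at *
    rw [hx, ih (fun y hy => h y (by simp [hy]))]
    push_cast
    ring

lemma take_lower (ys : List Int) : ∀ (k : Nat), k ≤ ys.length → ∀ c : Int,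
    (ys.take k).sum - k * c ≤ fsum ys c := by
  induction ys with
  | nil =>
    intro k hk c
    simp only [List.length_nil, Nat.le_zero] at hk
    simp [hk, fsum]
  | cons x t ih =>
    intro k hk c
    cases k with
    | zero => simpa using fsum_nonneg (x :: t) c
    | succ j =>
      have hj : j ≤ t.length := by simpa using hk
      have := ih j hj c
      simp only [List.take_succ_cons, List.sum_cons, fsum, List.map_cons, List.sum_cons] at *
      have hmax : x - c ≤ max (x - c) 0 := le_max_left _ _
      push_cast
      push_cast at this
      nlinarith [this, hmax]

lemma count_split {xs : List Int} (hpw : xs.Pairwise (fun a b => b ≤ a)) (c : Int) :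
    (∀ x ∈ xs.take (xs.countP (fun x => decide (c < x))), c < x) ∧
    (∀ x ∈ xs.drop (xs.countP (fun x => decide (c < x))), x ≤ c) := by
  induction xs with
  | nil => simp
  | cons x t ih =>
    rcases List.pairwise_cons.mp hpw with ⟨hx, hp⟩
    by_cases hcx : c < x
    · have hcount : (x :: t).countP (fun x => decide (c < x)) =
          t.countP (fun x => decide (c < x)) + 1 :=
        List.countP_cons_of_pos (by simpa using hcx)
      obtain ⟨ih1, ih2⟩ := ih hp
      rw [hcount]
      constructor
      · intro y hy
        rw [List.take_succ_cons] at hy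
        rcases List.mem_cons.mp hy with rfl | hy
        · exact hcx
        · exact ih1 y hy
      · intro y hy
        rw [List.drop_succ_cons] at hy
        exact ih2 y hy
    · have hzero : (x :: t).countP (fun x => decide (c < x)) = 0 := by
        rw [List.countP_eq_zero]
        intro y hy
        rcases List.mem_cons.mp hy with rfl | hy
        · simpa using hcx
        · have : y ≤ x := hx y hy
          simp only [decide_eq_true_eq]
          omega
      rw [hzero]
      refine ⟨by simp, ?_⟩
      intro y hy
      rw [List.drop_zero] at hy
      rcases List.mem_cons.mp hy with rfl | hy
      · omega
      · have : y ≤ x := hx y hy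
        omega

lemma fold_best (ask : Int) : ∀ (ys : List Int) (k0 p0 b0 : Int),
    b0 ≤ (ys.foldl (bstep ask) (k0, p0, b0)).2.2 ∧
    ((ys.foldl (bstep ask) (k0, p0, b0)).2.2 = b0 ∨
      ∃ j : Nat, 1 ≤ j ∧ j ≤ ys.length ∧
        (ys.foldl (bstep ask) (k0, p0, b0)).2.2 =
          PySem.Int.floordiv (p0 + (ys.take j).sum - ask) (k0 + j)) ∧
    (∀ j : Nat, 1 ≤ j → j ≤ ys.length →
      PySem.Int.floordiv (p0 + (ys.take j).sum - ask) (k0 + j) ≤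
        (ys.foldl (bstep ask) (k0, p0, b0)).2.2) := by
  intro ys
  induction ys with
  | nil =>
    intro k0 p0 b0
    refine ⟨le_refl _, Or.inl rfl, ?_⟩
    intro j h1 h2
    simp at h2
    omega
  | cons x t ih =>
    intro k0 p0 b0
    simp only [List.foldl_cons, bstep]
    obtain ⟨ih1, ih2, ih3⟩ :=
      ih (k0 + 1) (p0 + x) (max b0 (PySem.Int.floordiv (p0 + x - ask) (k0 + 1)))
    refine ⟨le_trans (le_max_left _ _) ih1, ?_, ?_⟩
    · rcases ih2 with h | ⟨j, hj1, hj2, hj3⟩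
      · rcases max_choice b0 (PySem.Int.floordiv (p0 + x - ask) (k0 + 1)) with hm | hm
        · exact Or.inl (by rw [h, hm])
        · refine Or.inr ⟨1, le_refl _, by simp, ?_⟩
          rw [h, hm]
          norm_num
      · refine Or.inr ⟨j + 1, by omega, by simp; omega, ?_⟩
        rw [hj3, List.take_succ_cons, List.sum_cons]
        congr 1
        · ring
        · push_cast
          ring
    · intro j hj1 hj2
      cases j with
      | zero => omega
      | succ i =>
        rcases Nat.eq_zero_or_pos i with rfl | hi
        · have : PySem.Int.floordiv (p0 + ((x :: t).take 1).sum - ask) (k0 + (1 : Nat)) =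
              PySem.Int.floordiv (p0 + x - ask) (k0 + 1) := by norm_num
          rw [this]
          exact le_trans (le_max_right _ _) ih1
        · have := ih3 i hi (by simpa using hj2)
          have heq : PySem.Int.floordiv (p0 + ((x :: t).take (i + 1)).sum - ask) (k0 + (i + 1 : Nat)) =
              PySem.Int.floordiv ((p0 + x) + (t.take i).sum - ask) ((k0 + 1) + i) := by
            rw [List.take_succ_cons, List.sum_cons]
            congr 1
            · ring
            · push_cast
              ring
          rw [heq]
          exact this

lemma b_good (arr : List Int) (ask : Int) : Good arr ask (binary_exploration_alt arr ask) := by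
  unfold binary_exploration_alt
  by_cases hask : ask ≤ 0
  · rw [if_pos hask]
    refine ⟨by norm_num, le_refl _, Or.inr (le_trans hask (fsum_nonneg _ _)), ?_⟩
    intro c h1 h2
    omega
  · rw [if_neg hask]
    show Good arr ask (min ((PySem.List.sorted (arr.filter fun x => decide (0 < x))
      (fun x => x) true).foldl (bstep ask) (0, 0, 0)).2.2 (10 ^ 9))
    have hperm : (PySem.List.sorted (arr.filter fun x => decide (0 < x)) (fun x => x) true).Perm
        (arr.filter fun x => decide (0 < x)) :=
      PySem.List.sorted_perm _ _ _
    set xs := PySem.List.sorted (arr.filter fun x => decide (0 < x)) (fun x => x) true with hxs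
    have hfs : ∀ c : Int, 0 ≤ c → fsum xs c = fsum arr c := fun c hc =>
      (fsum_perm hperm c).trans (fsum_filter_pos arr hc)
    have hpw : xs.Pairwise (fun a b => b ≤ a) := by
      have := PySem.List.sorted_pairwise_rev (arr.filter fun x => decide (0 < x)) (fun x : Int => x)
      simpa [hxs] using this
    obtain ⟨hb0, hfeas, hcomp⟩ := fold_best ask xs 0 0 0
    set best := (xs.foldl (bstep ask) (0, 0, 0)).2.2 with hbestdef
    have hmin0 : (0 : Int) ≤ min best (10 ^ 9) := le_min hb0 (by norm_num)
    refine ⟨hmin0, min_le_right _ _, ?_, ?_⟩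
    · rcases hfeas with h | ⟨j, hj1, hj2, hbest⟩
      · left
        rw [h]
        norm_num
      · right
        have hj0 : (0 : Int) < 0 + (j : Int) := by
          have : (1 : Int) ≤ (j : Int) := by exact_mod_cast hj1
          omega
        have hdiv : PySem.Int.floordiv (0 + (xs.take j).sum - ask) (0 + (j : Int)) * (0 + (j : Int)) ≤
            0 + (xs.take j).sum - ask :=
          (PySem.Int.le_floordiv_iff_mul_le hj0).mp (le_refl _)
        have h4 := take_lower xs j hj2 best
        have hfx : ask ≤ fsum xs best := by
          rw [hbest] at h4 ⊢
          nlinarith [hdiv, h4]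
        have hanti := fsum_antitone xs (min_le_left best (10 ^ 9))
        rw [← hfs (min best (10 ^ 9)) hmin0]
        exact le_trans hfx hanti
    · intro c hc1 hc2
      by_contra hge
      push_neg at hge
      have hc0 : (0 : Int) ≤ c := by omega
      have hxc : ask ≤ fsum xs c := by rw [hfs c hc0]; exact hge
      obtain ⟨hsp1, hsp2⟩ := count_split hpw c
      set k := xs.countP (fun x => decide (c < x)) with hk
      have hklen : k ≤ xs.length := List.countP_le_length
      have hfsum_eq : fsum xs c = (xs.take k).sum - (k : Int) * c := by
        calc fsum xs c = fsum (xs.take k) c + fsum (xs.drop k) c := by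
              rw [← fsum_append, List.take_append_drop]
          _ = ((xs.take k).sum - ((xs.take k).length : Int) * c) + 0 := by
              rw [fsum_all_gt hsp1, fsum_all_le hsp2]
          _ = (xs.take k).sum - (k : Int) * c := by
              rw [List.length_take, Nat.min_eq_left hklen]
              ring
      have hk1 : 1 ≤ k := by
        by_contra hk0
        have : k = 0 := by omega
        rw [this] at hfsum_eq
        simp at hfsum_eq
        omega
      have hj0 : (0 : Int) < 0 + (k : Int) := by
        have : (1 : Int) ≤ (k : Int) := by exact_mod_cast hk1
        omega
      have hck : c ≤ PySem.Int.floordiv (0 + (xs.take k).sum - ask) (0 + (k : Int)) := by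
        rw [PySem.Int.le_floordiv_iff_mul_le hj0]
        nlinarith [hxc, hfsum_eq]
      have hcb := hcomp k hk1 hklen
      have : c ≤ min best (10 ^ 9) := le_min (le_trans hck hcb) hc2
      omega

-- ===== VERDICT (by name: the statement is the Claim_ definition above) =====
theorem binary_exploration_spec : Claim_equal_binary_exploration := by
  intro arr ask _
  unfold Spec_binary_exploration
  exact good_unique (a_good arr ask) (b_good arr ask)
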